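-- pv_equiv track=rewrite | github.com/healthonrails/annolid | annolid/segmentation/cutie_vos/predict.py | _build_frame_intervals
-- ===== SOURCE A (Python) =====
-- from typing import Any, Dict, Iterable, List, Optional, Set, Tuple
--
-- def _build_frame_intervals(frame_indices: Set[int]) -> List[Tuple[int, int]]:
--     """Convert sparse frame indices into sorted closed intervals."""
--     if not frame_indices:
--         return []
--     sorted_indices = sorted(int(idx) for idx in frame_indices)
--     intervals: List[Tuple[int, int]] = []
--     start = sorted_indices[0]
--     end = start
--     for idx in sorted_indices[1:]:
--         if idx == end + 1:
--             end = idx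
--             continue
--         intervals.append((start, end))
--         start = idx
--         end = idx
--     intervals.append((start, end))
--     return intervals
-- ===== SOURCE B (Python) =====
-- from itertools import groupby
-- from typing import Iterable, List, Tuple
--
-- def _build_frame_intervals(frame_indices) -> List[Tuple[int, int]]:
--     """Convert sparse frame indices into sorted closed intervals."""
--     sorted_indices = sorted(int(idx) for idx in frame_indices)
--     intervals: List[Tuple[int, int]] = []
--     for _, group in groupby(enumerate(sorted_indices), key=lambda pair: pair[1] - pair[0]):
--         values = [v for _, v in group]
--         intervals.append((values[0], values[-1]))
--     return intervals
-- ===== Notes on version B (the rewrite author's own statement) =====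
-- stated objective: idiomatic
-- what changed: Replaces A's explicit (intervals, start, end) accumulator loop by itertools.groupby over enumerate(sorted) with the constant key value-minus-position, emitting (first, last) of each group.
import Mathlib
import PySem

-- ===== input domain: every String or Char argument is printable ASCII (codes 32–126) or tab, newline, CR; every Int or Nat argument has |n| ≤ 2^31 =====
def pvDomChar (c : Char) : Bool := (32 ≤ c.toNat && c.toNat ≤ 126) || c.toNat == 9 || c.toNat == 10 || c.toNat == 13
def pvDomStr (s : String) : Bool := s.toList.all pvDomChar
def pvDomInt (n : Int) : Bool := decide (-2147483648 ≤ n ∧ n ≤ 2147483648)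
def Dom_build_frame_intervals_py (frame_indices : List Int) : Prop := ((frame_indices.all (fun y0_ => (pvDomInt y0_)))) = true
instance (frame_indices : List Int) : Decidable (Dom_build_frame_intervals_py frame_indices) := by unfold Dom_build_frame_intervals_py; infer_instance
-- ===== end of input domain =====

-- B replaces A's explicit start/end accumulator loop by itertools.groupby over enumerate
-- (constant key idx - position on consecutive runs); idiomatic, same O(n log n) cost.

-- ===== PORT A =====
-- the for-loop over sorted_indices[1:], state = (intervals, start, end)
def build_frame_intervals_py (frame_indices : List Int) : List (Int × Int) :=
  if frame_indices = [] then []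
  else
    let sorted_indices := PySem.List.sorted (frame_indices.map (fun idx => idx)) (fun x => x) false
    match sorted_indices with
    | [] => []  -- unreachable: sorted of a nonempty list is nonempty
    | s0 :: rest =>
      let st := rest.foldl
        (fun (st : List (Int × Int) × Int × Int) idx =>
          if idx = st.2.2 + 1 then (st.1, st.2.1, idx)
          else (st.1 ++ [(st.2.1, st.2.2)], idx, idx)) ([], s0, s0)
      st.1 ++ [(st.2.1, st.2.2)]

-- ===== PORT B =====
-- hand-written port of itertools.groupby with key (i, v) ↦ v - i, grouping adjacent
-- elements of enumerate(sorted_indices) with equal key (exact for this use)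
def pvGroupByKey : List (Int × Int) → List (List (Int × Int))
  | [] => []
  | p :: rest =>
    match pvGroupByKey rest with
    | [] => [[p]]
    | g :: gs =>
      match g with
      | [] => [p] :: gs  -- unreachable: groups are nonempty
      | q :: _ => if p.2 - p.1 = q.2 - q.1 then (p :: g) :: gs else [p] :: g :: gs

def build_frame_intervals_py_alt (frame_indices : List Int) : List (Int × Int) :=
  let sorted_indices := PySem.List.sorted (frame_indices.map (fun idx => idx)) (fun x => x) false
  (pvGroupByKey (PySem.List.enumerate sorted_indices)).map
    (fun values => ((values.headD (0, 0)).2, (values.getLastD (0, 0)).2))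

-- ===== PRECONDITION & SPEC =====
def Spec_build_frame_intervals_py (frame_indices : List Int) (out : List (Int × Int)) : Prop := out = build_frame_intervals_py_alt frame_indices
instance (frame_indices : List Int) (out : List (Int × Int)) : Decidable (Spec_build_frame_intervals_py frame_indices out) := by unfold Spec_build_frame_intervals_py; infer_instance

-- ===== CLAIM (what is proved, stated in full; the proofs are below) =====
def Claim_equal_build_frame_intervals_py : Prop := ∀ (frame_indices : List Int), Dom_build_frame_intervals_py frame_indices → Spec_build_frame_intervals_py frame_indices (build_frame_intervals_py frame_indices)

-- ===== LEMMAS AND PROOFS =====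

-- canonical recursive description of the interval construction
def pvRuns (start e : Int) : List Int → List (Int × Int)
  | [] => [(start, e)]
  | idx :: rest => if idx = e + 1 then pvRuns start idx rest else (start, e) :: pvRuns idx idx rest

-- A's loop computes pvRuns
theorem pvFoldl_runs (l : List Int) (ivs : List (Int × Int)) (s e : Int) :
    (l.foldl (fun (st : List (Int × Int) × Int × Int) idx =>
        if idx = st.2.2 + 1 then (st.1, st.2.1, idx)
        else (st.1 ++ [(st.2.1, st.2.2)], idx, idx)) (ivs, s, e)).1 ++
      [((l.foldl (fun (st : List (Int × Int) × Int × Int) idx =>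
        if idx = st.2.2 + 1 then (st.1, st.2.1, idx)
        else (st.1 ++ [(st.2.1, st.2.2)], idx, idx)) (ivs, s, e)).2.1,
        (l.foldl (fun (st : List (Int × Int) × Int × Int) idx =>
        if idx = st.2.2 + 1 then (st.1, st.2.1, idx)
        else (st.1 ++ [(st.2.1, st.2.2)], idx, idx)) (ivs, s, e)).2.2)] =
      ivs ++ pvRuns s e l := by
  induction l generalizing ivs s e with
  | nil => simp [pvRuns]
  | cons x xs ih =>
    simp only [List.foldl_cons, pvRuns]
    by_cases h : x = e + 1
    · simp [h, ih]
    · simp [h, ih]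

-- the first component of pvRuns' head is the start; the rest is independent of it
theorem pvRuns_start (s s' e : Int) (l : List Int) :
    pvRuns s e l = (s, ((pvRuns s' e l).headD (0, 0)).2) :: (pvRuns s' e l).tail := by
  induction l generalizing e with
  | nil => simp [pvRuns]
  | cons x xs ih =>
    simp only [pvRuns]
    by_cases h : x = e + 1
    · rw [if_pos h, if_pos h]
      exact ih x
    · simp [h]

-- the first group of pvGroupByKey starts with the first element
theorem pvGroupByKey_head (p : Int × Int) (rest : List (Int × Int)) :
    ∃ g gs, pvGroupByKey (p :: rest) = (p :: g) :: gs := by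
  simp only [pvGroupByKey]
  rcases pvGroupByKey rest with _ | ⟨g, gs⟩
  · exact ⟨[], [], rfl⟩
  · rcases g with _ | ⟨q, t⟩
    · exact ⟨[], gs, rfl⟩
    · by_cases h : p.2 - p.1 = q.2 - q.1
      · exact ⟨q :: t, gs, by simp [h]⟩
      · exact ⟨[], (q :: t) :: gs, by simp [h]⟩

-- unfolding pvGroupByKey one step when the tail's grouping is known
theorem pvGroupByKey_cons₂ (p q : Int × Int) (l : List (Int × Int))
    (g : List (Int × Int)) (gs : List (List (Int × Int)))
    (hg : pvGroupByKey (q :: l) = (q :: g) :: gs) :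
    pvGroupByKey (p :: q :: l) =
      if p.2 - p.1 = q.2 - q.1 then (p :: q :: g) :: gs else [p] :: (q :: g) :: gs := by
  conv_lhs => rw [pvGroupByKey, hg]

-- B's groupby pipeline also computes pvRuns (for any enumeration offset n)
theorem pvGroupByKey_runs (s0 : Int) (rest : List Int) (n : Int) :
    (pvGroupByKey (PySem.List.enumerate (s0 :: rest) n)).map
      (fun values => ((values.headD (0, 0)).2, (values.getLastD (0, 0)).2)) =
    pvRuns s0 s0 rest := by
  induction rest generalizing s0 n with
  | nil => simp [PySem.List.enumerate_cons, PySem.List.enumerate_nil, pvGroupByKey, pvRuns]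
  | cons r rs ih =>
    have hinner := PySem.List.enumerate_cons r rs (n + 1)
    obtain ⟨g, gs, hg⟩ := pvGroupByKey_head (n + 1, r) (PySem.List.enumerate rs (n + 1 + 1))
    rw [PySem.List.enumerate_cons s0 (r :: rs) n, hinner,
        pvGroupByKey_cons₂ (n, s0) (n + 1, r) _ g gs hg]
    have hIH := ih r (n + 1)
    rw [hinner, hg, List.map_cons] at hIH
    by_cases h : r = s0 + 1
    · have hkey : s0 - n = r - (n + 1) := by omega
      rw [if_pos (by simpa using hkey), pvRuns, if_pos h, List.map_cons]
      rw [pvRuns_start s0 r r rs, ← hIH]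
      simp
    · have hkey : ¬ (s0 - n = r - (n + 1)) := by omega
      rw [if_neg (by simpa using hkey), pvRuns, if_neg h, List.map_cons, List.map_cons, ← hIH]
      simp

-- ===== VERDICT (by name: the statement is the Claim_ definition above) =====
theorem build_frame_intervals_py_spec : Claim_equal_build_frame_intervals_py := by
  intro frame_indices _
  unfold Spec_build_frame_intervals_py build_frame_intervals_py build_frame_intervals_py_alt
  by_cases hnil : frame_indices = []
  · subst hnil
    simp [PySem.List.sorted, PySem.List.enumerate_nil, pvGroupByKey]
  · simp only [if_neg hnil]
    rcases hs : PySem.List.sorted (frame_indices.map (fun idx => idx)) (fun x => x) false with _ | ⟨s0, rest⟩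
    · simp [PySem.List.enumerate_nil, pvGroupByKey]
    · simp only []
      rw [pvFoldl_runs rest [] s0 s0]
      rw [pvGroupByKey_runs s0 rest 0]
      simp
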